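-- pv_equiv track=rewrite | github.com/alisavkhtv/Yandex_Algorithms | Week 1: Tests/Task C/Task C.py | to_del
-- ===== SOURCE A (Python) =====
-- def transpose_matrix(x):
--     return [list(row) for row in zip(*x)]
--
-- def to_del(x):
--   n = len(x)
--   y = transpose_matrix(x)
--   m = len(y)
--   row = 0
--   while row < m:
--     if y[row] == list(n*'.'):
--       if row == 0:
--         del y[row]
--         m -= 1
--         row = 0
--       elif row == m-1:
--         del y[row]
--         m -= 1
--         row -= 1
--       else:
--         row += 1
--     else:
--       row += 1
--   return y
-- ===== SOURCE B (Python) =====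
-- def to_del(x):
--     dot = ['.'] * len(x)
--     cols = [list(c) for c in zip(*x)]
--     i = 0
--     while i < len(cols) and cols[i] == dot:
--         i += 1
--     j = len(cols)
--     while j > i and cols[j - 1] == dot:
--         j -= 1
--     return cols[i:j]
-- ===== Notes on version B (the rewrite author's own statement) =====
-- stated objective: alternative
-- what changed: A repeatedly deletes boundary all-dot columns from the transposed list in-place (del with index resets, rebuilding the dot list each iteration); B transposes once, finds the first and last non-dot column with two index scans and returns one slice.
import Mathlib
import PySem

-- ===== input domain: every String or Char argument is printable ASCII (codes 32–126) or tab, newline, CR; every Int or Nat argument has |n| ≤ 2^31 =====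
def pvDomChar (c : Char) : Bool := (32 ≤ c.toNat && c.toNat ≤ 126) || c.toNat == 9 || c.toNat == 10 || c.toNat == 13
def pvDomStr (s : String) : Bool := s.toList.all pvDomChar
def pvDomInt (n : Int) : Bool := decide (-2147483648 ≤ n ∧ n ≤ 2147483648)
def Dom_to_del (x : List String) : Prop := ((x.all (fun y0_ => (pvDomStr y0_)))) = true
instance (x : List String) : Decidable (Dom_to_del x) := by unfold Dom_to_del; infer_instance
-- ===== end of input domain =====

-- B replaces A's in-place boundary deletion loop by two index scans and one slice of the transposed rows (alternative decomposition; return value only, A mutates only its local list).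

-- ===== PORT A =====
-- zip(*x) over the strings of x: rows up to the shortest string, chars become 1-char strings (list(row)).
def pyZipStar (ls : List (List String)) : List (List String) :=
  match ls with
  | [] => []
  | a :: rest =>
    if (a :: rest).any List.isEmpty then []
    else ((a :: rest).map (fun l => l.headD "")) :: pyZipStar ((a :: rest).map List.tail)
termination_by (ls.headD []).length
decreasing_by
  simp only [List.headD_cons, List.map_cons, List.any_cons, Bool.or_eq_true, List.isEmpty_iff] at *
  cases a with
  | nil => simp_all
  | cons c cs => simp [List.tail]

def transpose_matrix (x : List String) : List (List String) :=
  pyZipStar (x.map (fun s => s.toList.map (fun c => String.mk [c])))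

-- the while loop of A: row/m indices, del y[row] via eraseIdx; dot = list(n*'.') hoisted (constant)
def loopA (dot : List String) (y : List (List String)) (row m : Nat) : List (List String) :=
  if h : row < m then
    if y.getD row [] = dot then
      if h0 : row = 0 then loopA dot (y.eraseIdx row) 0 (m - 1)
      else if row = m - 1 then loopA dot (y.eraseIdx row) (row - 1) (m - 1)
      else loopA dot y (row + 1) m
    else loopA dot y (row + 1) m
  else y
termination_by 2 * m - row
decreasing_by all_goals omega

def to_del (x : List String) : List (List String) :=
  let n := x.length
  let y := transpose_matrix x
  let m := y.length
  loopA (List.replicate n ".") y 0 m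

-- ===== PORT B =====
-- first while of Source B: i advances over leading all-dot columns
def scanFwd (dot : List String) : List (List String) → Nat
  | [] => 0
  | r :: rs => if r = dot then scanFwd dot rs + 1 else 0

-- second while of Source B: j moves down over trailing all-dot columns, not past i
def scanBk (cols : List (List String)) (dot : List String) (i j : Nat) : Nat :=
  if h : i < j then
    if cols.getD (j - 1) [] = dot then scanBk cols dot i (j - 1) else j
  else j
termination_by j
decreasing_by omega

def to_del_alt (x : List String) : List (List String) :=
  let dot := List.replicate x.length "."
  let cols := transpose_matrix x
  let i := scanFwd dot cols
  let j := scanBk cols dot i cols.length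
  (cols.drop i).take (j - i)   -- cols[i:j] with 0 ≤ i ≤ j ≤ len: exact as drop/take

-- ===== PRECONDITION & SPEC =====
def Spec_to_del (x : List String) (out : List (List String)) : Prop := out = to_del_alt x
instance (x : List String) (out : List (List String)) : Decidable (Spec_to_del x out) := by unfold Spec_to_del; infer_instance

-- ===== CLAIM (what is proved, stated in full; the proofs are below) =====
def Claim_equal_to_del : Prop := ∀ (x : List String), Dom_to_del x → Spec_to_del x (to_del x)

-- ===== LEMMAS AND PROOFS =====

-- remove leading dot rows
def ltrim (dot : List String) : List (List String) → List (List String)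
  | [] => []
  | r :: rs => if r = dot then ltrim dot rs else r :: rs

-- remove trailing dot rows
def rtrim (dot : List String) : List (List String) → List (List String)
  | [] => []
  | r :: rs => if rtrim dot rs = [] ∧ r = dot then [] else r :: rtrim dot rs

lemma rtrim_append_dot (dot : List String) (u : List (List String)) :
    rtrim dot (u ++ [dot]) = rtrim dot u := by
  induction u with
  | nil => simp [rtrim]
  | cons r rs ih => simp [rtrim, ih]

lemma rtrim_last_ne (dot : List String) (y : List (List String))
    (h : y.getLast? ≠ some dot) : rtrim dot y = y := by
  induction y with
  | nil => rfl
  | cons r rs ih =>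
    cases rs with
    | nil =>
      simp only [List.getLast?_singleton, ne_eq, Option.some.injEq] at h
      simp [rtrim, h]
    | cons s ss =>
      rw [List.getLast?_cons_cons] at h
      have h2 := ih h
      have hne : ¬ (rtrim dot (s :: ss) = [] ∧ r = dot) := by rw [h2]; simp
      conv_lhs => rw [rtrim]
      rw [if_neg hne, h2]

lemma ltrim_head (dot : List String) (y : List (List String)) (d : List String)
    (h : (ltrim dot y).head? = some d) : d ≠ dot := by
  induction y with
  | nil => simp [ltrim] at h
  | cons r rs ih =>
    by_cases hr : r = dot
    · simp [ltrim, hr] at h; exact ih h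
    · simp [ltrim, hr] at h; subst h; exact hr

lemma getLast?_eq_getD (y : List (List String)) (hy : y ≠ []) :
    y.getLast? = some (y.getD (y.length - 1) []) := by
  rw [List.getLast?_eq_getElem?]
  rw [List.getD_eq_getElem?_getD]
  cases h : y[y.length - 1]? with
  | none =>
    exfalso
    rw [List.getElem?_eq_none_iff] at h
    have : 0 < y.length := List.length_pos_iff.mpr hy
    omega
  | some v => rfl

-- scan phase of A: once the head is not dot, the loop computes rtrim.
lemma loopA_scan (dot : List String) :
    ∀ (N : Nat) (y : List (List String)) (row : Nat), 2 * y.length - row ≤ N →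
      (∀ d, y.head? = some d → d ≠ dot) →
      row ≤ y.length →
      (row = y.length → y.getLast? ≠ some dot ∨ y = []) →
      loopA dot y row y.length = rtrim dot y := by
  intro N
  induction N with
  | zero =>
    intro y row hN h1 h2 h3
    have hy : y.length = 0 := by omega
    have : y = [] := List.length_eq_zero_iff.mp hy
    subst this
    rw [loopA]; simp [rtrim]
  | succ N ih =>
    intro y row hN h1 h2 h3
    rw [loopA]
    by_cases hlt : row < y.length
    · rw [dif_pos hlt]
      by_cases hd : y.getD row [] = dot
      · rw [if_pos hd]
        by_cases h0 : row = 0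
        · -- impossible: head would be dot
          exfalso
          cases y with
          | nil => simp at hlt
          | cons a as =>
            subst h0
            simp [List.getD] at hd
            exact (h1 a rfl) hd
        · simp only [dif_neg h0]
          by_cases hend : row = y.length - 1
          · rw [if_pos hend]
            -- y = u ++ [dot], erase the last element
            have hy : y ≠ [] := by intro h; subst h; simp at hlt
            have hlast : y.getLast? = some dot := by
              rw [getLast?_eq_getD y hy, ← hend, hd]
            obtain ⟨u, d, hud⟩ : ∃ u d, y = u ++ [d] :=
              ⟨y.dropLast, y.getLast hy, (List.dropLast_concat_getLast hy).symm⟩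
            have hdd : d = dot := by
              rw [hud] at hlast; simp at hlast; exact hlast
            rw [hdd] at hud
            subst hud
            have hrl : row = u.length := by simp at hend; omega
            have herase : (u ++ [dot]).eraseIdx row = u := by
              rw [hrl]
              simp [List.eraseIdx_append_of_length_le (Nat.le_refl u.length)]
            rw [herase]
            have hlen' : (u ++ [dot]).length - 1 = u.length := by simp
            rw [hlen']
            have hrow1 : row - 1 ≤ u.length := by omega
            have hu_ne : u ≠ [] := by
              intro h; subst h
              simp at hrl
              exact h0 hrl
            have hres := ih u (row - 1) (by simp only [List.length_append, List.length_cons, List.length_nil] at hN; omega)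
              (by intro d' hd'; apply h1; cases u with
                  | nil => simp at hd'
                  | cons a as => simp at hd' ⊢; exact hd')
              hrow1
              (by intro hcon; exfalso; omega)
            rw [hres, rtrim_append_dot]
          · rw [if_neg hend]
            exact ih y (row + 1) (by omega) h1 (by omega)
              (by intro hc; exfalso; omega)
      · rw [if_neg hd]
        apply ih y (row + 1) (by omega) h1 (by omega)
        intro hc
        left
        have hy : y ≠ [] := by intro h; subst h; simp at hlt
        rw [getLast?_eq_getD y hy]
        intro hcon
        rw [Option.some_inj] at hcon
        apply hd
        have hrow : row = y.length - 1 := by omega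
        rw [hrow]
        exact hcon
    · rw [dif_neg hlt]
      have heq : row = y.length := by omega
      rcases h3 heq with h | h
      · exact (rtrim_last_ne dot y h).symm
      · subst h; rfl

-- leading phase of A: deleting at row 0 is ltrim.
lemma loopA_lead (dot : List String) (y : List (List String)) :
    loopA dot y 0 y.length = loopA dot (ltrim dot y) 0 (ltrim dot y).length := by
  induction y with
  | nil => rfl
  | cons r rs ih =>
    by_cases hr : r = dot
    · rw [loopA]
      rw [dif_pos (show 0 < (r :: rs).length by simp)]
      have hget : (r :: rs).getD 0 [] = dot := by simp [List.getD, hr]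
      rw [if_pos hget, dif_pos rfl]
      simp only [List.eraseIdx_cons_zero, List.length_cons, Nat.add_sub_cancel]
      have hlt2 : ltrim dot (r :: rs) = ltrim dot rs := by simp [ltrim, hr]
      rw [hlt2]
      exact ih
    · have hlt2 : ltrim dot (r :: rs) = r :: rs := by simp [ltrim, hr]
      rw [hlt2]

lemma scanFwd_le (dot : List String) (cols : List (List String)) :
    scanFwd dot cols ≤ cols.length := by
  induction cols with
  | nil => simp [scanFwd]
  | cons r rs ih => by_cases h : r = dot <;> simp [scanFwd, h] <;> omega

lemma drop_scanFwd (dot : List String) (cols : List (List String)) :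
    cols.drop (scanFwd dot cols) = ltrim dot cols := by
  induction cols with
  | nil => rfl
  | cons r rs ih =>
    by_cases h : r = dot
    · simp [scanFwd, h, ltrim, ih]
    · simp [scanFwd, h, ltrim]

lemma scanBk_eq (dot : List String) (cols : List (List String)) (i : Nat) :
    ∀ (k j : Nat), j = i + k → j ≤ cols.length →
      scanBk cols dot i j = i + (rtrim dot ((cols.drop i).take (j - i))).length := by
  intro k
  induction k with
  | zero =>
    intro j hj hle
    subst hj
    rw [scanBk]
    simp [rtrim]
  | succ k ih =>
    intro j hj hle
    have hij : i < j := by omega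
    rw [scanBk, dif_pos hij]
    have htake : (cols.drop i).take (j - i) =
        (cols.drop i).take (j - 1 - i) ++ [cols.getD (j - 1) []] := by
      have h1 : j - i = (j - 1 - i) + 1 := by omega
      rw [h1, List.take_succ]
      congr 1
      have h2 : (cols.drop i)[j - 1 - i]? = cols[i + (j - 1 - i)]? := by
        simp [List.getElem?_drop]
      rw [h2]
      have h3 : i + (j - 1 - i) = j - 1 := by omega
      rw [h3]
      have h4 : j - 1 < cols.length := by omega
      rw [List.getElem?_eq_getElem h4]
      simp [List.getD_eq_getElem?_getD, List.getElem?_eq_getElem h4]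
    by_cases hd : cols.getD (j - 1) [] = dot
    · rw [if_pos hd]
      rw [ih (j - 1) (by omega) (by omega)]
      rw [htake, hd, rtrim_append_dot]
    · rw [if_neg hd]
      rw [htake]
      rw [rtrim_last_ne dot _ (by
        rw [List.getLast?_concat]
        intro hcon; simp at hcon; exact hd hcon)]
      have hlen : ((cols.drop i).take (j - 1 - i)).length = j - 1 - i := by
        simp
        omega
      simp [hlen]
      omega

lemma take_rtrim (dot : List String) (u : List (List String)) :
    u.take (rtrim dot u).length = rtrim dot u := by
  induction u with
  | nil => rfl
  | cons r rs ih =>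
    by_cases h : rtrim dot rs = [] ∧ r = dot
    · simp [rtrim, h]
    · rw [rtrim, if_neg h]
      simp [ih]

lemma trim_eq_alt (dot : List String) (cols : List (List String)) :
    (cols.drop (scanFwd dot cols)).take
        (scanBk cols dot (scanFwd dot cols) cols.length - scanFwd dot cols) =
      rtrim dot (ltrim dot cols) := by
  set i := scanFwd dot cols with hi
  have hile : i ≤ cols.length := scanFwd_le dot cols
  rw [scanBk_eq dot cols i (cols.length - i) cols.length (by omega) le_rfl]
  have hfull : (cols.drop i).take (cols.length - i) = cols.drop i := by
    apply List.take_of_length_le; simp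
  rw [hfull]
  have hsimp : i + (rtrim dot (cols.drop i)).length - i = (rtrim dot (cols.drop i)).length := by omega
  rw [hsimp, take_rtrim, drop_scanFwd]

-- ===== VERDICT (by name: the statement is the Claim_ definition above) =====
theorem to_del_spec : Claim_equal_to_del := by
  intro x _
  unfold Spec_to_del to_del to_del_alt
  set dot := List.replicate x.length "." with hdot
  set cols := transpose_matrix x with hcols
  rw [loopA_lead]
  rw [loopA_scan dot (2 * (ltrim dot cols).length) (ltrim dot cols) 0 (by omega)
    (fun d hd => ltrim_head dot cols d hd) (Nat.zero_le _)
    (by intro h; right; exact (List.length_eq_zero_iff.mp h.symm))]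
  exact (trim_eq_alt dot cols).symm
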